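-- pv_equiv track=rewrite | github.com/shaffshalihin/Lab-AP-06 | H071241009/Praktikum Ke-5/soal_3_anagram.py | hapus
-- ===== SOURCE A (Python) =====
-- def hapus(str1, str2):
--
--     freq1 = {}
--     for char in str1:
--         if char in freq1:
--             freq1[char] += 1
--         else:
--             freq1[char] = 1
--
--     penghapusan = 0
--     for char in freq1:
--         if char in str2:
--             penghapusan += max(0, freq1[char] - str2.count(char))
--         else:
--             penghapusan += freq1[char]
--
--     return penghapusan
-- ===== SOURCE B (Python) =====
-- def hapus(str1, str2):
--     a = sorted(str1)
--     b = sorted(str2)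
--     i = j = penghapusan = 0
--     while i < len(a) and j < len(b):
--         if a[i] == b[j]:
--             i += 1
--             j += 1
--         elif a[i] < b[j]:
--             penghapusan += 1
--             i += 1
--         else:
--             j += 1
--     return penghapusan + (len(a) - i)
-- ===== Notes on version B (the rewrite author's own statement) =====
-- stated objective: alternative
-- what changed: Replaces the frequency-dict plus per-key str2.count scan with sorting both strings and a single two-pointer merge that counts str1 characters left unmatched.
import Mathlib
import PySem

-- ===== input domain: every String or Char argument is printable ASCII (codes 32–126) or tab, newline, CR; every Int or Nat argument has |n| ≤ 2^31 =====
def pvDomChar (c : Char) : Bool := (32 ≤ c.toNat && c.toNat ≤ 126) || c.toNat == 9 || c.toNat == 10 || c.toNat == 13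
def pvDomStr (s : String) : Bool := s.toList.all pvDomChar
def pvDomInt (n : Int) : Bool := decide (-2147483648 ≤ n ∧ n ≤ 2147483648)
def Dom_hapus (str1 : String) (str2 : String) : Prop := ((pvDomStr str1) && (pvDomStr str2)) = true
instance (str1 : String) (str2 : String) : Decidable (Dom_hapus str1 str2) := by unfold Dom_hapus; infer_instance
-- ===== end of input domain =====

-- B replaces A's frequency dict + per-key str2.count scan with sorting both strings and one
-- two-pointer merge counting unmatched str1 characters (alternative algorithm, same result).

-- ===== PORT A =====
def hapus (str1 : String) (str2 : String) : Int :=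
  let freq1 : PySem.Dict Char Int :=
    str1.toList.foldl
      (fun d c => if d.contains c then d.insert c (d.getD c 0 + 1) else d.insert c 1)
      PySem.Dict.empty
  freq1.keys.foldl
    (fun pen c =>
      if PySem.Str.isIn (String.singleton c) str2 then
        pen + max 0 (freq1.getD c 0 - (PySem.Str.count str2 (String.singleton c) : Int))
      else
        pen + freq1.getD c 0)
    0

-- ===== PORT B =====
-- the while loop of Source B: the suffixes a.drop i / b.drop j are the loop state (i, j);
-- loop exit returns penghapusan + remaining length of a
def hapusMerge : List Char → List Char → Int → Int
  | [], _, d => d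
  | x :: a, [], d => d + (x :: a).length
  | x :: a, y :: b, d =>
    if x = y then hapusMerge a b d
    else if x < y then hapusMerge a (y :: b) (d + 1)
    else hapusMerge (x :: a) b d
termination_by a b _ => a.length + b.length

def hapus_alt (str1 : String) (str2 : String) : Int :=
  hapusMerge (PySem.List.sorted str1.toList (fun c => c) false)
             (PySem.List.sorted str2.toList (fun c => c) false) 0

-- ===== PRECONDITION & SPEC =====
def Spec_hapus (str1 : String) (str2 : String) (out : Int) : Prop := out = hapus_alt str1 str2
instance (str1 : String) (str2 : String) (out : Int) : Decidable (Spec_hapus str1 str2 out) := by unfold Spec_hapus; infer_instance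

-- ===== CLAIM (what is proved, stated in full; the proofs are below) =====
def Claim_equal_hapus : Prop := ∀ (str1 : String) (str2 : String), Dom_hapus str1 str2 → Spec_hapus str1 str2 (hapus str1 str2)

-- ===== LEMMAS AND PROOFS =====

-- counting a single character: Python's s.count(c) for a 1-char needle is List.count
lemma chars_count_go_singleton (c : Char) :
    ∀ (fuel : Nat) (l : List Char) (acc : Nat), l.length ≤ fuel →
      PySem.Chars.count.go [c] fuel l acc = acc + l.count c := by
  intro fuel
  induction fuel with
  | zero =>
    intro l acc h
    have : l = [] := List.eq_nil_of_length_eq_zero (Nat.le_zero.mp h)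
    subst this; simp [PySem.Chars.count.go]
  | succ n ih =>
    intro l acc h
    cases l with
    | nil => simp [PySem.Chars.count.go]
    | cons x t =>
      simp only [PySem.Chars.count.go]
      by_cases hx : x = c
      · subst hx
        have hpre : List.isPrefixOf [x] (x :: t) = true := by
          simp [List.isPrefixOf]
        have hd : List.drop [x].length (x :: t) = t := rfl
        rw [if_pos hpre, hd, ih t (acc + 1) (by simpa using Nat.lt_succ_iff.mp (by simpa using h))]
        simp
        omega
      · have hpre : List.isPrefixOf [c] (x :: t) = false := by
          simp [List.isPrefixOf]
          exact fun hc => (hx hc.symm).elim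
        simp only [hpre, Bool.false_eq_true, if_false]
        rw [ih t acc (by simpa using Nat.lt_succ_iff.mp (by simpa using h))]
        simp [hx]

lemma chars_count_singleton (l : List Char) (c : Char) :
    PySem.Chars.count l [c] = l.count c := by
  simp only [PySem.Chars.count, List.isEmpty_cons, Bool.false_eq_true, if_false]
  simpa using chars_count_go_singleton c l.length l 0 le_rfl

lemma str_count_singleton (s : String) (c : Char) :
    (PySem.Str.count s (String.singleton c) : Int) = (s.toList.count c : Int) := by
  have h : PySem.Str.count s (String.singleton c) = s.toList.count c := by
    rw [PySem.Str.count_eq]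
    simpa using chars_count_singleton s.toList c
  exact_mod_cast h

-- c in str2 (1-char needle) is list membership
lemma str_isIn_singleton (s : String) (c : Char) :
    PySem.Str.isIn (String.singleton c) s = true ↔ c ∈ s.toList := by
  rw [PySem.Str.isIn_iff_infix]
  simpa using List.singleton_infix_iff c s.toList

-- A's first loop builds Counter(str1)
lemma hapus_freq_eq (xs : List Char) :
    xs.foldl (fun d c => if d.contains c then d.insert c (d.getD c 0 + 1) else d.insert c 1)
      (PySem.Dict.empty : PySem.Dict Char Int)
      = PySem.Dict.counter xs := by
  have hf : (fun (d : PySem.Dict Char Int) c =>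
        if d.contains c then d.insert c (d.getD c 0 + 1) else d.insert c 1)
      = fun d c => d.insert c (d.getD c 0 + 1) := by
    funext d c
    by_cases h : d.contains c
    · simp [h]
    · have h0 : d.getD c 0 = 0 :=
        PySem.Dict.getD_of_not_contains d 0 (Bool.not_eq_true _ ▸ by simpa using h)
      simp [h, h0]
  rw [hf]
  exact PySem.Dict.foldl_insert_getD_add_one_eq_counter xs

-- A's value as a sum over the distinct characters of str1
lemma hapus_eq_sum (str1 str2 : String) :
    hapus str1 str2 =
      ((PySem.Set.ofList str1.toList).map
        (fun c => max 0 ((str1.toList.count c : Int) - (str2.toList.count c : Int)))).sum := by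
  unfold hapus
  simp only [hapus_freq_eq, PySem.Dict.keys_counter]
  have hstep : (fun (pen : Int) (c : Char) =>
      if PySem.Str.isIn (String.singleton c) str2 then
        pen + max 0 ((PySem.Dict.counter str1.toList).getD c 0 - (PySem.Str.count str2 (String.singleton c) : Int))
      else pen + (PySem.Dict.counter str1.toList).getD c 0)
      = fun pen c => pen + max 0 ((str1.toList.count c : Int) - (str2.toList.count c : Int)) := by
    funext pen c
    rw [PySem.Dict.getD_counter, str_count_singleton]
    by_cases h : PySem.Str.isIn (String.singleton c) str2 = true
    · rw [if_pos h]
    · rw [if_neg h]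
      have hm : c ∉ str2.toList := fun hc => h ((str_isIn_singleton str2 c).mpr hc)
      have h2 : str2.toList.count c = 0 := List.count_eq_zero.mpr hm
      rw [h2]
      push_cast
      omega
  rw [hstep, PySem.List.foldl_add]
  simp

-- the merge loop of B computes |a| minus the multiset-intersection size, on sorted inputs
lemma hapusMerge_eq : ∀ (a b : List Char) (d : Int),
    a.Pairwise (· ≤ ·) → b.Pairwise (· ≤ ·) →
    hapusMerge a b d = d + a.length - (((a : Multiset Char)) ∩ (b : Multiset Char)).card := by
  intro a b d ha hb
  induction a, b, d using hapusMerge.induct with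
  | case1 b d => simp [hapusMerge]
  | case2 x a d => simp [hapusMerge]
  | case3 a y b d ih =>
    rw [List.pairwise_cons] at ha hb
    have hmem : y ∈ (y ::ₘ (b : Multiset Char)) := Multiset.mem_cons_self y _
    rw [hapusMerge, if_pos rfl, ih ha.2 hb.2]
    have hint : ((y :: a : List Char) : Multiset Char) ∩ ((y :: b : List Char) : Multiset Char)
        = y ::ₘ ((a : Multiset Char) ∩ (b : Multiset Char)) := by
      rw [← Multiset.cons_coe, ← Multiset.cons_coe, Multiset.cons_inter_of_pos _ hmem,
        Multiset.erase_cons_head]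
    rw [hint, Multiset.card_cons, List.length_cons]
    push_cast
    ring
  | case4 x a y b d hne hlt ih =>
    rw [List.pairwise_cons] at ha
    have hx : x ∉ (((y :: b) : List Char) : Multiset Char) := by
      rw [Multiset.mem_coe]
      intro hm
      rcases List.mem_cons.mp hm with h | h
      · exact hne h
      · rw [List.pairwise_cons] at hb
        exact absurd (lt_of_lt_of_le hlt (hb.1 x h)) (lt_irrefl x)
    rw [hapusMerge, if_neg hne, if_pos hlt, ih ha.2 hb]
    have hint : ((x :: a : List Char) : Multiset Char) ∩ ((y :: b : List Char) : Multiset Char)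
        = (a : Multiset Char) ∩ ((y :: b : List Char) : Multiset Char) := by
      conv_lhs => rw [← Multiset.cons_coe]
      rw [Multiset.cons_inter_of_neg _ hx]
    rw [hint, List.length_cons]
    push_cast
    ring
  | case5 x a y b d hne hnlt ih =>
    rw [List.pairwise_cons] at hb
    have hyx : y < x := lt_of_le_of_ne (le_of_not_gt hnlt) (fun h => hne h.symm)
    have hy : y ∉ (((x :: a) : List Char) : Multiset Char) := by
      rw [Multiset.mem_coe]
      intro hm
      rcases List.mem_cons.mp hm with h | h
      · exact absurd h (ne_of_lt hyx)
      · rw [List.pairwise_cons] at ha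
        exact absurd (lt_of_lt_of_le hyx (ha.1 y h)) (lt_irrefl y)
    rw [hapusMerge, if_neg hne, if_neg hnlt, ih ha hb.2]
    have hint : ((x :: a : List Char) : Multiset Char) ∩ ((y :: b : List Char) : Multiset Char)
        = ((x :: a : List Char) : Multiset Char) ∩ ((b : List Char) : Multiset Char) := by
      rw [Multiset.inter_comm, ← Multiset.cons_coe, Multiset.cons_inter_of_neg _ hy,
        Multiset.inter_comm]
    rw [hint]

-- B's value in the same closed form
lemma hapus_alt_eq (str1 str2 : String) :
    hapus_alt str1 str2 =
      (str1.toList.length : Int)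
        - (((str1.toList : Multiset Char)) ∩ (str2.toList : Multiset Char)).card := by
  unfold hapus_alt
  rw [hapusMerge_eq _ _ _ (PySem.List.sorted_pairwise _ _) (PySem.List.sorted_pairwise _ _)]
  have p1 : (PySem.List.sorted str1.toList (fun c => c) false).Perm str1.toList :=
    PySem.List.sorted_perm _ _ _
  have p2 : (PySem.List.sorted str2.toList (fun c => c) false).Perm str2.toList :=
    PySem.List.sorted_perm _ _ _
  rw [Multiset.coe_eq_coe.mpr p1, Multiset.coe_eq_coe.mpr p2, p1.length_eq]
  ring

-- the two closed forms agree
lemma sum_eq_sub (a b : List Char) :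
    ((PySem.Set.ofList a).map
        (fun c => max 0 ((a.count c : Int) - (b.count c : Int)))).sum
      = (a.length : Int) - (((a : Multiset Char)) ∩ (b : Multiset Char)).card := by
  set g : Char → Int := fun c => max 0 ((a.count c : Int) - (b.count c : Int)) with hg
  have hnodup : (PySem.Set.ofList a : List Char).Nodup := PySem.Set.nodup_ofList a
  have htf : (PySem.Set.ofList a : List Char).toFinset = a.toFinset := by
    ext c
    simp [List.mem_toFinset, PySem.Set.mem_ofList]
  rw [← List.sum_toFinset g hnodup, htf]
  have hcardA : ((a : Multiset Char)).card = ∑ c ∈ a.toFinset, Multiset.count c (a : Multiset Char) := by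
    rw [← Multiset.toFinset_sum_count_eq (a : Multiset Char), List.toFinset_coe]
  have hsub : ((a : Multiset Char) ∩ (b : Multiset Char)).toFinset ⊆ a.toFinset := by
    intro c hc
    rw [Multiset.mem_toFinset, Multiset.mem_inter] at hc
    rw [List.mem_toFinset]
    exact Multiset.mem_coe.mp hc.1
  have hcardI : ((a : Multiset Char) ∩ (b : Multiset Char)).card
      = ∑ c ∈ a.toFinset, Multiset.count c ((a : Multiset Char) ∩ (b : Multiset Char)) := by
    rw [← Multiset.toFinset_sum_count_eq ((a : Multiset Char) ∩ (b : Multiset Char))]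
    exact Finset.sum_subset hsub (fun c _ hc => by
      rw [Multiset.count_eq_zero]
      intro hm
      exact hc (Multiset.mem_toFinset.mpr hm))
  have hlen : (a.length : Int) = ((a : Multiset Char)).card := by simp
  rw [hlen, hcardA, hcardI]
  push_cast
  rw [← Finset.sum_sub_distrib]
  apply Finset.sum_congr rfl
  intro c _
  simp only [hg, Multiset.count_inter, Multiset.coe_count]
  push_cast
  omega

-- ===== VERDICT (by name: the statement is the Claim_ definition above) =====
theorem hapus_spec : Claim_equal_hapus := by
  intro str1 str2 _
  unfold Spec_hapus
  rw [hapus_eq_sum, hapus_alt_eq, sum_eq_sub]
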